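-- pv_equiv track=rewrite | github.com/helberius/parsing_questions | parser_01/parser_funcs.py | group_lines_per_question
-- ===== SOURCE A (Python) =====
-- def group_lines_per_question(ls_lines):
--     ld_grouped_lines = []
--     ls_new_question = []
--     for l in ls_lines:
--
--         if l is not None and   l.startswith("Question"):
--             ld_grouped_lines.append(ls_new_question)
--             ls_new_question=[]
--             ls_new_question.append(l)
--         else:
--             ls_new_question.append(l)
--
--     ld_grouped_lines.append(ls_new_question)
--     return ld_grouped_lines
-- ===== SOURCE B (Python) =====
-- def group_lines_per_question(ls_lines):
--     starts = [i for i, l in enumerate(ls_lines) if l is not None and l.startswith("Question")]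
--     bounds = [0] + starts + [len(ls_lines)]
--     return [ls_lines[s:e] for s, e in zip(bounds, bounds[1:])]
-- ===== Notes on version B (the rewrite author's own statement) =====
-- stated objective: alternative
-- what changed: B replaces A's stateful accumulator loop (current-group list mutated and flushed on markers) by computing the marker indices once and emitting the groups as slices between consecutive boundaries.
import Mathlib
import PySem

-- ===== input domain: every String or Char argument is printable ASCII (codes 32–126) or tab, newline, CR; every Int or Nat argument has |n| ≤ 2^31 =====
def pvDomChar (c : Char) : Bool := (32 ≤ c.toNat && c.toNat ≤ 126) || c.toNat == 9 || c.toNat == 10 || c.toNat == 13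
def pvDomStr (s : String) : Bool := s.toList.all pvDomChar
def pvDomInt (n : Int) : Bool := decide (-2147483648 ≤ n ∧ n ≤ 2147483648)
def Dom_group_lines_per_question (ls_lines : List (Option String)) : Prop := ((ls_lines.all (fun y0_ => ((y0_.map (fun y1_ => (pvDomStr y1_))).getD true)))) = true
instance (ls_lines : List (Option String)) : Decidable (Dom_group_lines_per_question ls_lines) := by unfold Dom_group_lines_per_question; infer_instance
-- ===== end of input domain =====

-- B computes the marker indices once and emits the groups as boundary-to-boundary
-- slices, replacing A's stateful current-group accumulator loop (alternative decomposition, same cost).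

-- shared predicate: `l is not None and l.startswith("Question")`
def pvIsQ (l : Option String) : Bool :=
  match l with
  | some s => PySem.Str.startswith s "Question"
  | none => false

-- ===== PORT A =====
def group_lines_per_question (ls_lines : List (Option String)) : List (List (Option String)) :=
  let r := ls_lines.foldl
    (fun (acc : List (List (Option String)) × List (Option String)) l =>
      if pvIsQ l then (acc.1 ++ [acc.2], [l]) else (acc.1, acc.2 ++ [l]))
    ([], [])
  r.1 ++ [r.2]

-- ===== PORT B =====
def group_lines_per_question_alt (ls_lines : List (Option String)) : List (List (Option String)) :=
  let starts := ((PySem.List.enumerate ls_lines 0).filter (fun p => pvIsQ p.2)).map Prod.fst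
  let bounds := (0 : Int) :: starts ++ [(ls_lines.length : Int)]
  (bounds.zip (PySem.List.slice bounds (some 1) none)).map
    (fun p => PySem.List.slice ls_lines (some p.1) (some p.2))

-- ===== PRECONDITION & SPEC =====
def Spec_group_lines_per_question (ls_lines : List (Option String)) (out : List (List (Option String))) : Prop := out = group_lines_per_question_alt ls_lines
instance (ls_lines : List (Option String)) (out : List (List (Option String))) : Decidable (Spec_group_lines_per_question ls_lines out) := by unfold Spec_group_lines_per_question; infer_instance

-- ===== CLAIM (what is proved, stated in full; the proofs are below) =====
def Claim_equal_group_lines_per_question : Prop := ∀ (ls_lines : List (Option String)), Dom_group_lines_per_question ls_lines → Spec_group_lines_per_question ls_lines (group_lines_per_question ls_lines)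

-- ===== LEMMAS AND PROOFS =====

-- apply f to the head group only
def pvMapHead (f : List (Option String) → List (Option String)) :
    List (List (Option String)) → List (List (Option String))
  | [] => []
  | g :: gs => f g :: gs

-- reference grouping, structural recursion
def pvGrp : List (Option String) → List (List (Option String))
  | [] => [[]]
  | x :: xs =>
    if pvIsQ x then [] :: pvMapHead (x :: ·) (pvGrp xs)
    else pvMapHead (x :: ·) (pvGrp xs)

theorem pvMapHead_mapHead (f g : List (Option String) → List (Option String))
    (l : List (List (Option String))) :
    pvMapHead f (pvMapHead g l) = pvMapHead (fun h => f (g h)) l := by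
  cases l <;> simp [pvMapHead]

theorem pvMapHead_id (l : List (List (Option String))) : pvMapHead (fun h => h) l = l := by
  cases l <;> simp [pvMapHead]

theorem foldA_eq (xs : List (Option String)) :
    ∀ (g : List (List (Option String))) (cur : List (Option String)),
      (let r := xs.foldl
        (fun (acc : List (List (Option String)) × List (Option String)) l =>
          if pvIsQ l then (acc.1 ++ [acc.2], [l]) else (acc.1, acc.2 ++ [l])) (g, cur)
       r.1 ++ [r.2]) = g ++ pvMapHead (cur ++ ·) (pvGrp xs) := by
  induction xs with
  | nil => intro g cur; simp [pvGrp, pvMapHead]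
  | cons x xs ih =>
    intro g cur
    by_cases h : pvIsQ x
    · simp only [List.foldl_cons, h, if_pos, pvGrp]
      rw [ih]
      simp [pvMapHead]
    · simp only [List.foldl_cons, h, pvGrp, if_neg, Bool.false_eq_true, not_false_iff]
      rw [ih]
      simp [pvMapHead_mapHead, List.append_assoc]

theorem portA_eq_grp (xs : List (Option String)) : group_lines_per_question xs = pvGrp xs := by
  have := foldA_eq xs [] []
  simpa [group_lines_per_question, pvMapHead_id] using this

-- starts list with a given offset
def pvStarts (k : Int) (xs : List (Option String)) : List Int :=
  (((PySem.List.enumerate xs k).filter (fun p => pvIsQ p.2)).map Prod.fst)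

theorem pvStarts_cons (k : Int) (x : Option String) (xs : List (Option String)) :
    pvStarts k (x :: xs) = (if pvIsQ x then [k] else []) ++ pvStarts (k + 1) xs := by
  by_cases h : pvIsQ x <;> simp [pvStarts, PySem.List.enumerate_cons, h]

theorem pvStarts_shift (xs : List (Option String)) :
    ∀ k : Int, pvStarts (k + 1) xs = (pvStarts k xs).map (· + 1) := by
  induction xs with
  | nil => intro k; simp [pvStarts, PySem.List.enumerate_nil]
  | cons x xs ih =>
    intro k
    rw [pvStarts_cons, pvStarts_cons, ih]
    by_cases h : pvIsQ x <;> simp [h]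

theorem pvStarts_nonneg (xs : List (Option String)) :
    ∀ (k i : Int), 0 ≤ k → i ∈ pvStarts k xs → 0 ≤ i := by
  induction xs with
  | nil => intro k i _ h; simp [pvStarts, PySem.List.enumerate_nil] at h
  | cons x xs ih =>
    intro k i hk h
    rw [pvStarts_cons] at h
    simp only [List.mem_append] at h
    rcases h with h | h
    · by_cases hq : pvIsQ x <;> simp [hq] at h; omega
    · exact ih (k + 1) i (by omega) h

-- adjacent pairs of a boundary list, mapped to slices
def pvAdjSl (ls : List (Option String)) (b : List Int) : List (List (Option String)) :=
  (b.zip b.tail).map (fun p => PySem.List.slice ls (some p.1) (some p.2))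

theorem slice_cons_succ (x : Option String) (xs : List (Option String)) (s e : Int)
    (hs : 0 ≤ s) (he : 0 ≤ e) :
    PySem.List.slice (x :: xs) (some (s + 1)) (some (e + 1)) =
      PySem.List.slice xs (some s) (some e) := by
  rw [PySem.List.slice_toNat (ha := by omega) (hb := by omega), PySem.List.slice_toNat (ha := by omega) (hb := by omega)]
  have h1 : (s + 1).toNat = s.toNat + 1 := by omega
  have h2 : (e + 1).toNat = e.toNat + 1 := by omega
  simp [h1, h2]

theorem slice_cons_zero (x : Option String) (xs : List (Option String)) (e : Int)
    (he : 0 ≤ e) :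
    PySem.List.slice (x :: xs) (some 0) (some (e + 1)) =
      x :: PySem.List.slice xs (some 0) (some e) := by
  rw [PySem.List.slice_toNat (ha := by omega) (hb := by omega), PySem.List.slice_toNat (ha := by omega) (hb := by omega)]
  have h2 : (e + 1).toNat = e.toNat + 1 := by omega
  simp [h2]

-- shifting every boundary by 1 matches consing x in front of the list being sliced
theorem pvAdjSl_shift (x : Option String) (xs : List (Option String)) :
    ∀ (u : List Int), (∀ i ∈ u, 0 ≤ i) →
      pvAdjSl (x :: xs) (u.map (· + 1)) = pvAdjSl xs u := by
  intro u
  induction u with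
  | nil => intro _; simp [pvAdjSl]
  | cons a u ih =>
    intro hnn
    cases u with
    | nil => simp [pvAdjSl]
    | cons b r =>
      have ha : 0 ≤ a := hnn a (by simp)
      have hb : 0 ≤ b := hnn b (by simp)
      have hr : ∀ i ∈ b :: r, 0 ≤ i := fun i hi => hnn i (by simp at hi ⊢; tauto)
      have := ih hr
      simp only [pvAdjSl, List.map_cons, List.tail_cons, List.zip_cons_cons] at this ⊢
      rw [slice_cons_succ x xs a b ha hb, this]

theorem pvAdjSl_cons0 (x : Option String) (xs : List (Option String))
    (v : List Int) (hne : v ≠ []) (hnn : ∀ i ∈ v, 0 ≤ i) :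
    pvAdjSl (x :: xs) ((0 : Int) :: v.map (· + 1)) =
      pvMapHead (x :: ·) (pvAdjSl xs ((0 : Int) :: v)) := by
  cases v with
  | nil => exact absurd rfl hne
  | cons h r =>
    have hh : 0 ≤ h := hnn h (by simp)
    have hshift := pvAdjSl_shift x xs (h :: r) hnn
    simp only [pvAdjSl, List.map_cons, List.tail_cons, List.zip_cons_cons] at hshift ⊢
    rw [slice_cons_zero x xs h hh, hshift]
    rfl

-- B rewritten through pvAdjSl
theorem portB_eq_adj (xs : List (Option String)) :
    group_lines_per_question_alt xs =
      pvAdjSl xs ((0 : Int) :: (pvStarts 0 xs ++ [(xs.length : Int)])) := by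
  simp [group_lines_per_question_alt, pvAdjSl, pvStarts, PySem.List.slice_from_one]

theorem portB_eq_grp (xs : List (Option String)) :
    group_lines_per_question_alt xs = pvGrp xs := by
  rw [portB_eq_adj]
  induction xs with
  | nil =>
    simp [pvStarts, PySem.List.enumerate_nil, pvAdjSl, pvGrp, PySem.List.slice]
  | cons x xs ih =>
    have hv_ne : pvStarts 0 xs ++ [(xs.length : Int)] ≠ [] := by simp
    have hv_nn : ∀ i ∈ pvStarts 0 xs ++ [(xs.length : Int)], 0 ≤ i := by
      intro i hi
      simp only [List.mem_append, List.mem_singleton] at hi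
      rcases hi with hi | rfl
      · exact pvStarts_nonneg xs 0 i le_rfl hi
      · positivity
    have hb : pvStarts 0 (x :: xs) ++ [((x :: xs).length : Int)] =
        (if pvIsQ x then [(0 : Int)] else []) ++
          (pvStarts 0 xs ++ [(xs.length : Int)]).map (· + 1) := by
      rw [pvStarts_cons]
      rw [show (0:Int)+1 = 1 from rfl, show pvStarts 1 xs = pvStarts (0+1) xs from by norm_num, pvStarts_shift xs 0]
      simp [List.length_cons]
    by_cases h : pvIsQ x
    · rw [hb]
      simp only [h, if_pos]
      have : pvAdjSl (x :: xs)
          ((0 : Int) :: ([(0 : Int)] ++ (pvStarts 0 xs ++ [(xs.length : Int)]).map (· + 1))) =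
          PySem.List.slice (x :: xs) (some 0) (some 0) ::
            pvAdjSl (x :: xs) ((0 : Int) :: (pvStarts 0 xs ++ [(xs.length : Int)]).map (· + 1)) := by
        simp [pvAdjSl]
      rw [this, pvAdjSl_cons0 x xs _ hv_ne hv_nn, ih]
      have hsl : PySem.List.slice (x :: xs) (some (0:Int)) (some (0:Int)) = [] := by
        rw [PySem.List.slice_toNat (ha := by omega) (hb := by omega)]; simp
      simp [pvGrp, h, hsl]
    · rw [hb]
      simp only [h, if_neg, Bool.false_eq_true, not_false_iff, List.nil_append]
      rw [pvAdjSl_cons0 x xs _ hv_ne hv_nn, ih]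
      simp [pvGrp, h]

-- ===== VERDICT (by name: the statement is the Claim_ definition above) =====
theorem group_lines_per_question_spec : Claim_equal_group_lines_per_question := by
  intro ls _
  unfold Spec_group_lines_per_question
  rw [portA_eq_grp, portB_eq_grp]
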